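-- pv_equiv track=rewrite | github.com/andresfeliper3/MF_analysis | RepeatsLoader.py | ___divide_in_valid_segments_of_nucleotides
-- ===== SOURCE A (Python) =====
-- def ___divide_in_valid_segments_of_nucleotides(sequence: str) -> list[str]:
--     valid_segments = []
--     current_segment = []
--
--     for nuc in sequence:
--         if nuc in 'ATCG':
--             current_segment.append(nuc)
--         else:
--             if current_segment:
--                 valid_segments.append(''.join(current_segment))
--                 current_segment = []
--
--     # Add the last segment if it exists
--     if current_segment:
--         valid_segments.append(''.join(current_segment))
--     return valid_segments
-- ===== SOURCE B (Python) =====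
-- from itertools import groupby
--
-- def ___divide_in_valid_segments_of_nucleotides(sequence: str) -> list[str]:
--     return [''.join(block) for valid, block in groupby(sequence, key=lambda c: c in 'ATCG') if valid]
-- ===== Notes on version B (the rewrite author's own statement) =====
-- stated objective: idiomatic
-- what changed: Replaced the incremental append-and-flush state machine with an itertools.groupby partition of the string into runs of valid/invalid characters, joining and keeping only the valid runs.
import Mathlib
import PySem

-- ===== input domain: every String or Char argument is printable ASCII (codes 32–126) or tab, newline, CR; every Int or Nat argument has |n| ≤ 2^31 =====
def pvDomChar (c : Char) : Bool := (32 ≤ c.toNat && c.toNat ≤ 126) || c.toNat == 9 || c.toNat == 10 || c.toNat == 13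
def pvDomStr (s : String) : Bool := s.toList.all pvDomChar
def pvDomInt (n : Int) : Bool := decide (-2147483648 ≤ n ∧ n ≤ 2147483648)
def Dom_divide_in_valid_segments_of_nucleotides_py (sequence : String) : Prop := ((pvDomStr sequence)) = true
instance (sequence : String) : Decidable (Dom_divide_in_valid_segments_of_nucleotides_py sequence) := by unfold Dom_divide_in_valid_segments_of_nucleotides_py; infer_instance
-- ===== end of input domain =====

-- B replaces A's incremental append-and-flush state machine by a run-partition
-- (groupby on the validity predicate), keeping the valid runs; objective: idiomatic.


-- `nuc in 'ATCG'` (nuc is a single character)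
def pvIsNuc (c : Char) : Bool := c == 'A' || c == 'T' || c == 'C' || c == 'G'

-- ===== PORT A =====
-- loop body: state = (valid_segments, current_segment)
def pvAStep (st : List String × List Char) (nuc : Char) : List String × List Char :=
  if pvIsNuc nuc then (st.1, st.2 ++ [nuc])
  else if st.2 ≠ [] then (st.1 ++ [String.ofList st.2], []) else st

def divide_in_valid_segments_of_nucleotides_py (sequence : String) : List String :=
  let st := sequence.toList.foldl pvAStep ([], [])
  if st.2 ≠ [] then st.1 ++ [String.ofList st.2] else st.1

-- ===== PORT B =====
-- groupby-style: peel off one maximal run at a time (takeWhile/dropWhile), keep the valid runs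
def pvRuns : List Char → List String
  | [] => []
  | c :: rest =>
    if pvIsNuc c then
      String.ofList (c :: rest.takeWhile pvIsNuc) :: pvRuns (rest.dropWhile pvIsNuc)
    else
      pvRuns rest
termination_by cs => cs.length
decreasing_by
  · simpa using Nat.lt_succ_of_le (List.length_dropWhile_le pvIsNuc rest)
  · simp

def divide_in_valid_segments_of_nucleotides_py_alt (sequence : String) : List String :=
  pvRuns sequence.toList

-- ===== PRECONDITION & SPEC =====
def Spec_divide_in_valid_segments_of_nucleotides_py (sequence : String) (out : List String) : Prop := out = divide_in_valid_segments_of_nucleotides_py_alt sequence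
instance (sequence : String) (out : List String) : Decidable (Spec_divide_in_valid_segments_of_nucleotides_py sequence out) := by unfold Spec_divide_in_valid_segments_of_nucleotides_py; infer_instance

-- ===== CLAIM (what is proved, stated in full; the proofs are below) =====
def Claim_equal_divide_in_valid_segments_of_nucleotides_py : Prop := ∀ (sequence : String), Dom_divide_in_valid_segments_of_nucleotides_py sequence → Spec_divide_in_valid_segments_of_nucleotides_py sequence (divide_in_valid_segments_of_nucleotides_py sequence)

-- ===== LEMMAS AND PROOFS =====

-- result of A's run, as a function of a pending current segment `cur`
def pvGlue (cur : List Char) (cs : List Char) : List String :=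
  if cur = [] then pvRuns cs
  else String.ofList (cur ++ cs.takeWhile pvIsNuc) :: pvRuns (cs.dropWhile pvIsNuc)

def pvFin (st : List String × List Char) : List String :=
  if st.2 ≠ [] then st.1 ++ [String.ofList st.2] else st.1

lemma pvInv (cs : List Char) : ∀ (segs : List String) (cur : List Char),
    pvFin (cs.foldl pvAStep (segs, cur)) = segs ++ pvGlue cur cs := by
  induction cs with
  | nil =>
    intro segs cur
    by_cases h : cur = [] <;> simp [pvFin, pvGlue, h, pvRuns]
  | cons c rest ih =>
    intro segs cur
    by_cases hv : pvIsNuc c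
    · have hstep : pvAStep (segs, cur) c = (segs, cur ++ [c]) := by simp [pvAStep, hv]
      rw [List.foldl_cons, hstep, ih]
      congr 1
      by_cases h : cur = []
      · simp [pvGlue, h, pvRuns, hv]
      · have : cur ++ [c] ≠ [] := by simp
        simp [pvGlue, h, this, hv]
    · by_cases h : cur = []
      · have hstep : pvAStep (segs, cur) c = (segs, []) := by simp [pvAStep, hv, h]
        rw [List.foldl_cons, hstep, h, ih]
        simp [pvGlue, pvRuns, hv]
      · have hstep : pvAStep (segs, cur) c = (segs ++ [String.ofList cur], []) := by
          simp [pvAStep, hv, h]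
        rw [List.foldl_cons, hstep, ih]
        simp [pvGlue, h, hv, pvRuns]

-- ===== VERDICT (by name: the statement is the Claim_ definition above) =====
theorem divide_in_valid_segments_of_nucleotides_py_spec : Claim_equal_divide_in_valid_segments_of_nucleotides_py := by
  intro s _
  show _ = _
  have := pvInv s.toList [] []
  simpa [divide_in_valid_segments_of_nucleotides_py, pvFin, pvGlue,
    divide_in_valid_segments_of_nucleotides_py_alt] using this
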